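-- pv_equiv track=rewrite | github.com/dotexe0/browser-ai | patch-chromium.py | patch_browser_resources_grd
-- ===== SOURCE A (Python) =====
-- def patch_browser_resources_grd(content):
--     """Add AI panel resource entries to browser_resources.grd."""
--     resource_lines = [
--         '',
--         '      <!-- AI Panel Side Panel -->',
--         '      <include name="IDR_AI_PANEL_HTML" file="resources/side_panel/ai_panel/ai_panel.html" type="BINDATA" />',
--         '      <include name="IDR_AI_PANEL_JS" file="resources/side_panel/ai_panel/ai_panel.js" type="BINDATA" />',
--         '      <include name="IDR_AI_PANEL_CSS" file="resources/side_panel/ai_panel/ai_panel.css" type="BINDATA" />',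
--         '      <include name="IDR_AI_PANEL_PROVIDER_INTERFACE_JS" file="resources/side_panel/ai_panel/ai_provider_interface.js" type="BINDATA" />',
--         '      <include name="IDR_AI_PANEL_OPENAI_PROVIDER_JS" file="resources/side_panel/ai_panel/openai_provider.js" type="BINDATA" />',
--         '      <include name="IDR_AI_PANEL_OLLAMA_PROVIDER_JS" file="resources/side_panel/ai_panel/ollama_provider.js" type="BINDATA" />',
--         '      <include name="IDR_AI_PANEL_ANTHROPIC_PROVIDER_JS" file="resources/side_panel/ai_panel/anthropic_provider.js" type="BINDATA" />',
--         '      <include name="IDR_AI_PANEL_LOCAL_LLM_PROVIDER_JS" file="resources/side_panel/ai_panel/local_llm_provider.js" type="BINDATA" />',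
--         '      <include name="IDR_AI_PANEL_PROVIDER_MANAGER_JS" file="resources/side_panel/ai_panel/ai_provider_manager.js" type="BINDATA" />',
--         '      <include name="IDR_AI_PANEL_NATIVE_MESSAGING_JS" file="resources/side_panel/ai_panel/native_messaging_helper.js" type="BINDATA" />',
--     ]
--
--     lines = content.split('\n')
--     insert_idx = None
--
--     # Find the last <include> BINDATA line and add after it
--     for i, line in enumerate(lines):
--         if '<include name="IDR_' in line and 'BINDATA' in line:
--             insert_idx = i
--
--     if insert_idx is None:
--         return None
--
--     for j, rl in enumerate(resource_lines):
--         lines.insert(insert_idx + 1 + j, rl)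
--
--     return '\n'.join(lines)
-- ===== SOURCE B (Python) =====
-- def patch_browser_resources_grd(content):
--     """Add AI panel resource entries to browser_resources.grd."""
--     resource_lines = [
--         '',
--         '      <!-- AI Panel Side Panel -->',
--         '      <include name="IDR_AI_PANEL_HTML" file="resources/side_panel/ai_panel/ai_panel.html" type="BINDATA" />',
--         '      <include name="IDR_AI_PANEL_JS" file="resources/side_panel/ai_panel/ai_panel.js" type="BINDATA" />',
--         '      <include name="IDR_AI_PANEL_CSS" file="resources/side_panel/ai_panel/ai_panel.css" type="BINDATA" />',
--         '      <include name="IDR_AI_PANEL_PROVIDER_INTERFACE_JS" file="resources/side_panel/ai_panel/ai_provider_interface.js" type="BINDATA" />',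
--         '      <include name="IDR_AI_PANEL_OPENAI_PROVIDER_JS" file="resources/side_panel/ai_panel/openai_provider.js" type="BINDATA" />',
--         '      <include name="IDR_AI_PANEL_OLLAMA_PROVIDER_JS" file="resources/side_panel/ai_panel/ollama_provider.js" type="BINDATA" />',
--         '      <include name="IDR_AI_PANEL_ANTHROPIC_PROVIDER_JS" file="resources/side_panel/ai_panel/anthropic_provider.js" type="BINDATA" />',
--         '      <include name="IDR_AI_PANEL_LOCAL_LLM_PROVIDER_JS" file="resources/side_panel/ai_panel/local_llm_provider.js" type="BINDATA" />',
--         '      <include name="IDR_AI_PANEL_PROVIDER_MANAGER_JS" file="resources/side_panel/ai_panel/ai_provider_manager.js" type="BINDATA" />',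
--         '      <include name="IDR_AI_PANEL_NATIVE_MESSAGING_JS" file="resources/side_panel/ai_panel/native_messaging_helper.js" type="BINDATA" />',
--     ]
--
--     lines = content.split('\n')
--     # Walk from the end: the first hit of the reverse scan is the last BINDATA include.
--     for back, line in enumerate(reversed(lines)):
--         if '<include name="IDR_' in line and 'BINDATA' in line:
--             cut = len(lines) - back
--             # splice the whole block in one slice concatenation
--             return '\n'.join(lines[:cut] + resource_lines + lines[cut:])
--     return None
-- ===== Notes on version B (the rewrite author's own statement) =====
-- stated objective: simpler
-- what changed: B scans the lines in reverse and stops at the first BINDATA include (instead of scanning all lines forward to remember the last match) and splices the whole resource block in with one slice concatenation instead of twelve per-element list.insert calls.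
import Mathlib
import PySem

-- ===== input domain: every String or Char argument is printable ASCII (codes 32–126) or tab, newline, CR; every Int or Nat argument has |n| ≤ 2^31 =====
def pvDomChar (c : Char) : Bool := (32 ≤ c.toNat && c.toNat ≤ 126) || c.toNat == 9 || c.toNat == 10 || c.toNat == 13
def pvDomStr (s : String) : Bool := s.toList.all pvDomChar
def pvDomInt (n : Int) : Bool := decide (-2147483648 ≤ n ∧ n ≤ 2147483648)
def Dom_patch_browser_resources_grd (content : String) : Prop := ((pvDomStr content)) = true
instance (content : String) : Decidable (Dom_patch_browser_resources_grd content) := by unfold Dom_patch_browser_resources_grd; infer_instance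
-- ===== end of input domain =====

-- B replaces A's forward scan-for-the-last-match and per-element insert loop by a
-- reverse scan that stops at the first BINDATA include and a single slice splice.

-- shared constant (both Pythons define the identical literal list) and the
-- shared membership test '<include name="IDR_' in line and 'BINDATA' in line
def pvResourceLines : List String := [
  "",
  "      <!-- AI Panel Side Panel -->",
  "      <include name=\"IDR_AI_PANEL_HTML\" file=\"resources/side_panel/ai_panel/ai_panel.html\" type=\"BINDATA\" />",
  "      <include name=\"IDR_AI_PANEL_JS\" file=\"resources/side_panel/ai_panel/ai_panel.js\" type=\"BINDATA\" />",
  "      <include name=\"IDR_AI_PANEL_CSS\" file=\"resources/side_panel/ai_panel/ai_panel.css\" type=\"BINDATA\" />",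
  "      <include name=\"IDR_AI_PANEL_PROVIDER_INTERFACE_JS\" file=\"resources/side_panel/ai_panel/ai_provider_interface.js\" type=\"BINDATA\" />",
  "      <include name=\"IDR_AI_PANEL_OPENAI_PROVIDER_JS\" file=\"resources/side_panel/ai_panel/openai_provider.js\" type=\"BINDATA\" />",
  "      <include name=\"IDR_AI_PANEL_OLLAMA_PROVIDER_JS\" file=\"resources/side_panel/ai_panel/ollama_provider.js\" type=\"BINDATA\" />",
  "      <include name=\"IDR_AI_PANEL_ANTHROPIC_PROVIDER_JS\" file=\"resources/side_panel/ai_panel/anthropic_provider.js\" type=\"BINDATA\" />",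
  "      <include name=\"IDR_AI_PANEL_LOCAL_LLM_PROVIDER_JS\" file=\"resources/side_panel/ai_panel/local_llm_provider.js\" type=\"BINDATA\" />",
  "      <include name=\"IDR_AI_PANEL_PROVIDER_MANAGER_JS\" file=\"resources/side_panel/ai_panel/ai_provider_manager.js\" type=\"BINDATA\" />",
  "      <include name=\"IDR_AI_PANEL_NATIVE_MESSAGING_JS\" file=\"resources/side_panel/ai_panel/native_messaging_helper.js\" type=\"BINDATA\" />"]

def pvBindataHit (line : String) : Bool :=
  PySem.Str.isIn "<include name=\"IDR_" line && PySem.Str.isIn "BINDATA" line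

-- content.split('\n'): sep ≠ "" so split? always returns some; getD is exact here
def pvSplitNL (content : String) : List String :=
  (PySem.Str.split? content "\n").getD []

-- ===== PORT A =====
-- for i, line in enumerate(lines): if … : insert_idx = i
def patch_browser_resources_grd (content : String) : Option String :=
  let lines := pvSplitNL content
  let insert_idx : Option Int :=
    (PySem.List.enumerate lines).foldl
      (fun acc p => if pvBindataHit p.2 then some p.1 else acc) none
  match insert_idx with
  | none => none
  | some i =>
      -- for j, rl in enumerate(resource_lines): lines.insert(insert_idx + 1 + j, rl)
      let lines :=
        (PySem.List.enumerate pvResourceLines).foldl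
          (fun ls q => PySem.List.insert ls (i + 1 + q.1) q.2) lines
      some (PySem.Str.join "\n" lines)

-- ===== PORT B =====
-- for back, line in enumerate(reversed(lines)): if … : return …  (early return = recursion)
def pvScanBack : List String → Nat → Option Nat
  | [], _ => none
  | l :: rest, back => if pvBindataHit l then some back else pvScanBack rest (back + 1)

-- lines[:cut] / lines[cut:] with 0 ≤ cut ≤ len(lines) are exactly take/drop
def patch_browser_resources_grd_alt (content : String) : Option String :=
  let lines := pvSplitNL content
  match pvScanBack lines.reverse 0 with
  | none => none
  | some back =>
      let cut := lines.length - back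
      some (PySem.Str.join "\n" (lines.take cut ++ pvResourceLines ++ lines.drop cut))

-- ===== PRECONDITION & SPEC =====
def Spec_patch_browser_resources_grd (content : String) (out : Option String) : Prop := out = patch_browser_resources_grd_alt content
instance (content : String) (out : Option String) : Decidable (Spec_patch_browser_resources_grd content out) := by unfold Spec_patch_browser_resources_grd; infer_instance

-- ===== CLAIM (what is proved, stated in full; the proofs are below) =====
def Claim_equal_patch_browser_resources_grd : Prop := ∀ (content : String), Dom_patch_browser_resources_grd content → Spec_patch_browser_resources_grd content (patch_browser_resources_grd content)

-- ===== LEMMAS AND PROOFS =====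

-- shifting the running counter of the reverse scan
theorem pvScanBack_shift (l : List String) (k : Nat) :
    pvScanBack l k = (pvScanBack l 0).map (· + k) := by
  induction l generalizing k with
  | nil => simp [pvScanBack]
  | cons x xs ih =>
      by_cases h : pvBindataHit x = true
      · simp [pvScanBack, h]
      · simp only [pvScanBack, h, if_neg, Bool.not_eq_true] at *
        rw [ih (k + 1), ih 1, Option.map_map]
        cases pvScanBack xs 0
        · simp
        · simp
          omega

-- the reverse scan's result is a valid offset from the end
theorem pvScanBack_lt (l : List String) (k b : Nat) (h : pvScanBack l k = some b) :
    b < k + l.length := by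
  induction l generalizing k with
  | nil => simp [pvScanBack] at h
  | cons x xs ih =>
      simp only [pvScanBack] at h
      split at h
      · cases h; simp
      · have := ih (k + 1) h; simp only [List.length_cons]; omega

-- A's forward last-match fold equals B's backward first-match scan (index bridge)
theorem pvFind_eq_scan (lines : List String) :
    (PySem.List.enumerate lines).foldl
        (fun acc p => if pvBindataHit p.2 then some p.1 else acc) none
      = (pvScanBack lines.reverse 0).map
          (fun back => ((lines.length - 1 - back : Nat) : Int)) := by
  induction lines using List.reverseRecOn with
  | nil => simp [PySem.List.enumerate, pvScanBack]
  | append_singleton xs x ih =>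
      rw [PySem.List.enumerate_append, List.foldl_append, ih]
      simp only [List.reverse_append, List.reverse_cons, List.reverse_nil, List.nil_append,
        List.cons_append, pvScanBack, PySem.List.enumerate_cons, PySem.List.enumerate_nil,
        List.foldl_cons, List.foldl_nil]
      by_cases h : pvBindataHit x = true
      · simp [h]
      · simp only [h, if_neg, Bool.false_eq_true, not_false_iff]
        rw [pvScanBack_shift xs.reverse 1]
        cases hs : pvScanBack xs.reverse 0 with
        | none => simp
        | some b =>
            simp only [Option.map_some]
            congr 1
            simp only [List.length_append, List.length_cons, List.length_nil]
            omega

-- A's sequence of list.insert calls at consecutive positions is one slice splice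
theorem pvInsertAll (rs : List String) (s p : Nat) (lines : List String)
    (h : p + s ≤ lines.length) :
    (PySem.List.enumerate rs (s : Int)).foldl
        (fun ls q => PySem.List.insert ls ((p : Int) + q.1) q.2) lines
      = lines.take (p + s) ++ rs ++ lines.drop (p + s) := by
  induction rs generalizing s lines with
  | nil => simp [PySem.List.enumerate_nil]
  | cons r rs ih =>
      rw [PySem.List.enumerate_cons, List.foldl_cons]
      have hcast : (p : Int) + (s : Int) = ((p + s : Nat) : Int) := by push_cast; ring
      rw [hcast, PySem.List.insert_natCast _ _ _ h]
      have hlen : p + (s + 1) ≤ (lines.take (p + s) ++ r :: lines.drop (p + s)).length := by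
        simp only [List.length_append, List.length_cons, List.length_take, List.length_drop]
        omega
      have hcast2 : ((s : Int) + 1) = ((s + 1 : Nat) : Int) := by push_cast; ring
      rw [hcast2, ih (s + 1) _ hlen]
      have htk : (lines.take (p + s) ++ r :: lines.drop (p + s)).take (p + (s + 1))
          = lines.take (p + s) ++ [r] := by
        rw [List.take_append]
        have : (lines.take (p + s)).length = p + s := by
          simp only [List.length_take]; omega
        rw [List.take_of_length_le (by omega), this]
        have : p + (s + 1) - (p + s) = 1 := by omega
        rw [this]; simp
      have hdr : (lines.take (p + s) ++ r :: lines.drop (p + s)).drop (p + (s + 1))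
          = lines.drop (p + s) := by
        rw [List.drop_append]
        have hl : (lines.take (p + s)).length = p + s := by
          simp only [List.length_take]; omega
        rw [List.drop_of_length_le (by omega), hl]
        have : p + (s + 1) - (p + s) = 1 := by omega
        rw [this]; simp
      rw [htk, hdr]
      simp

-- ===== VERDICT (by name: the statement is the Claim_ definition above) =====
theorem patch_browser_resources_grd_spec : Claim_equal_patch_browser_resources_grd := by
  intro content _
  unfold Spec_patch_browser_resources_grd patch_browser_resources_grd patch_browser_resources_grd_alt
  simp only []
  rw [pvFind_eq_scan]
  cases hs : pvScanBack (pvSplitNL content).reverse 0 with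
  | none => simp
  | some back =>
      simp only [Option.map_some]
      set lines := pvSplitNL content with hl
      have hb : back < lines.length := by
        have := pvScanBack_lt lines.reverse 0 back hs; simpa using this
      have hfun : (fun (ls : List String) (q : Int × String) =>
            PySem.List.insert ls (((lines.length - 1 - back : Nat) : Int) + 1 + q.1) q.2)
          = (fun ls q => PySem.List.insert ls (((lines.length - back : Nat) : Int) + q.1) q.2) := by
        funext ls q
        congr 1
        omega
      rw [hfun]
      have h0 := pvInsertAll pvResourceLines 0 (lines.length - back) lines (by omega)
      push_cast at h0
      simp only [Nat.add_zero] at h0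
      rw [h0]
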